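-- pv_equiv track=rewrite | github.com/zzandland/Algo-DS | Python/Amazon_2020_03/favorite_genres.py | favorite_genres
-- ===== SOURCE A (Python) =====
-- from typing import List, Dict
-- from collections import Counter
--
-- def favorite_genres(userSongs: Dict[str, List[str]],
--                     songGenres: Dict[str, List[str]]) -> Dict[str, List[str]]:
--     '''
--     >>> favorite_genres(userSongs1, songGenres1)
--     {'David': ['Rock', 'Techno'], 'Emma': ['Pop']}
--     >>> favorite_genres(userSongs2, songGenres2)
--     {'David': [], 'Emma': []}
--     '''
--     # dict of song as key and genre as val O(genre * songList)
--     song2Genre = {}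
--     for genre, songList in songGenres.items():
--         for song in songList:
--             song2Genre[song] = genre
--
--     # for each user store freq of each genre and track fav genre O(user * songList)
--     res = {}
--     for user, songList in userSongs.items():
--         fav, favFreq = set(), 0
--         freq = Counter()
--         for song in songList:
--             if song not in song2Genre: continue
--             genre = song2Genre[song]
--             freq[genre] += 1
--             if freq[genre] > favFreq:
--                 fav.clear()
--                 favFreq = freq[genre]
--             if freq[genre] == favFreq:
--                 fav.add(genre)
--         res[user] = sorted(list(fav))
--
--     return res
-- ===== SOURCE B (Python) =====
-- def favorite_genres(userSongs, songGenres):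
--     song2genre = {s: g for g, songs in songGenres.items() for s in songs}
--     res = {}
--     for user, songs in userSongs.items():
--         genres = sorted(song2genre[s] for s in songs if s in song2genre)
--         best, max_len, run, prev = [], 0, 0, None
--         for g in genres:
--             run = run + 1 if g == prev else 1
--             prev = g
--             if run > max_len:
--                 max_len, best = run, [g]
--             elif run == max_len:
--                 best.append(g)
--         res[user] = best
--     return res
-- ===== Notes on version B (the rewrite author's own statement) =====
-- stated objective: alternative
-- what changed: Replaces A's per-user Counter with inline argmax/tie-set maintenance by a sort-then-run-length-scan: B sorts each user's mapped genre list and scans consecutive runs, keeping the genres whose run length is maximal (which come out already in sorted order, so the final sort disappears).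
import Mathlib
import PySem

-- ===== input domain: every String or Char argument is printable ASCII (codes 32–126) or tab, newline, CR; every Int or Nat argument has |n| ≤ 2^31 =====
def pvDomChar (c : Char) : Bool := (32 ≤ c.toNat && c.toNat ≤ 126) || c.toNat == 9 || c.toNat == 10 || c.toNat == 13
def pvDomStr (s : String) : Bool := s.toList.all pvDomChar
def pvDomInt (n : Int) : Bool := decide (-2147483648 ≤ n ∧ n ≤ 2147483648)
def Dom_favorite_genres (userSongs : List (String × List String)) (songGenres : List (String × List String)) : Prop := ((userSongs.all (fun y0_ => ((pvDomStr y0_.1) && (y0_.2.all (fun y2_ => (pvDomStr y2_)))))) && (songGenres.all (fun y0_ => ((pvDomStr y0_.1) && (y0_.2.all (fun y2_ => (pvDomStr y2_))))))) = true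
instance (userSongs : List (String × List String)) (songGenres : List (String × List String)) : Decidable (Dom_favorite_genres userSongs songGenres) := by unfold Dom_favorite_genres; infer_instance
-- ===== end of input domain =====

-- B replaces A's Counter-with-inline-argmax by sort-then-run-length-scan: per user it sorts the
-- mapped genres and scans runs, keeping the genres of maximal run length (same cost; alternative).

-- ===== PORT A =====
-- song2Genre = {}; for genre, songList in songGenres.items(): for song in songList: song2Genre[song] = genre
def pvSong2Genre (songGenres : List (String × List String)) : PySem.Dict String String :=
  songGenres.foldl
    (fun d p => p.2.foldl (fun d song => d.insert song p.1) d)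
    PySem.Dict.empty

-- the body of A's per-user song loop (state = (fav, favFreq, freq))
def pvAStep (s2g : PySem.Dict String String)
    (st : PySem.Set String × Int × PySem.Dict String Int) (song : String) :
    PySem.Set String × Int × PySem.Dict String Int :=
  match s2g.get? song with
  | none => st                                   -- if song not in song2Genre: continue
  | some genre =>
    let freq := st.2.2.modify genre 0 (· + 1)    -- freq[genre] += 1
    let c := freq.getD genre 0
    let favFreq := if c > st.2.1 then c else st.2.1
    let fav := if c > st.2.1 then PySem.Set.empty else st.1   -- fav.clear()
    let fav := if c == favFreq then PySem.Set.add fav genre else fav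
    (fav, favFreq, freq)

def favorite_genres (userSongs : List (String × List String)) (songGenres : List (String × List String)) : List (String × List String) :=
  let song2Genre := pvSong2Genre songGenres
  let res := userSongs.foldl
    (fun res p =>
      let st := p.2.foldl (pvAStep song2Genre) (PySem.Set.empty, 0, PySem.Dict.empty)
      res.insert p.1 (PySem.List.sorted st.1 (fun x => x) false))
    PySem.Dict.empty
  res.items

-- ===== PORT B =====
-- the body of B's scan loop over the sorted genre list; state = (best, max_len, run, prev)
def pvScanStep (st : List String × Int × Int × Option String) (g : String) :
    List String × Int × Int × Option String :=
  let run := if some g == st.2.2.2 then st.2.2.1 + 1 else 1   -- run = run + 1 if g == prev else 1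
  let prev := some g
  if run > st.2.1 then ([g], run, run, prev)                  -- max_len, best = run, [g]
  else if run == st.2.1 then (st.1 ++ [g], st.2.1, run, prev) -- best.append(g)
  else (st.1, st.2.1, run, prev)

def favorite_genres_alt (userSongs : List (String × List String)) (songGenres : List (String × List String)) : List (String × List String) :=
  let song2genre := pvSong2Genre songGenres
  (userSongs.foldl
    (fun res p =>
      -- genres = sorted(song2genre[s] for s in songs if s in song2genre)
      let genres := PySem.List.sorted (p.2.filterMap song2genre.get?) (fun x => x) false
      res.insert p.1 (genres.foldl pvScanStep ([], 0, 0, none)).1)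
    PySem.Dict.empty).items

-- ===== PRECONDITION & SPEC =====
def Spec_favorite_genres (userSongs : List (String × List String)) (songGenres : List (String × List String)) (out : List (String × List String)) : Prop := out = favorite_genres_alt userSongs songGenres
instance (userSongs : List (String × List String)) (songGenres : List (String × List String)) (out : List (String × List String)) : Decidable (Spec_favorite_genres userSongs songGenres out) := by unfold Spec_favorite_genres; infer_instance

-- ===== CLAIM (what is proved, stated in full; the proofs are below) =====
def Claim_equal_favorite_genres : Prop := ∀ (userSongs : List (String × List String)) (songGenres : List (String × List String)), Dom_favorite_genres userSongs songGenres → Spec_favorite_genres userSongs songGenres (favorite_genres userSongs songGenres)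

-- ===== LEMMAS AND PROOFS =====

def pvGStep (st : PySem.Set String × Int × PySem.Dict String Int) (genre : String) :
    PySem.Set String × Int × PySem.Dict String Int :=
  let freq := st.2.2.modify genre 0 (· + 1)
  let c := freq.getD genre 0
  let favFreq := if c > st.2.1 then c else st.2.1
  let fav := if c > st.2.1 then PySem.Set.empty else st.1
  let fav := if c == favFreq then PySem.Set.add fav genre else fav
  (fav, favFreq, freq)

def pvInv (gs : List String) (st : PySem.Set String × Int × PySem.Dict String Int) : Prop :=
  st.2.2 = PySem.Dict.counter gs ∧
  (∀ g ∈ gs, (gs.count g : Int) ≤ st.2.1) ∧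
  (gs = [] → st.1 = [] ∧ st.2.1 = 0) ∧
  (gs ≠ [] → ∃ g ∈ gs, (gs.count g : Int) = st.2.1) ∧
  st.1.Nodup ∧
  (∀ g, g ∈ st.1 ↔ g ∈ gs ∧ (gs.count g : Int) = st.2.1)

theorem pvA_inv (gs : List String) :
    pvInv gs (gs.foldl pvGStep (PySem.Set.empty, 0, PySem.Dict.empty)) := by
  induction gs using List.reverseRecOn with
  | nil =>
    refine ⟨rfl, by simp, by simp [PySem.Set.empty], by simp, by simp [PySem.Set.empty], ?_⟩
    simp [PySem.Set.empty]
  | append_singleton gs g ih =>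
    obtain ⟨hfreq, hle, hnil, hatt, hnd, hmem⟩ := ih
    rw [List.foldl_append]
    set st := gs.foldl pvGStep (PySem.Set.empty, 0, PySem.Dict.empty) with hst
    have hfreq' : (st.2.2.modify g 0 (· + 1)) = PySem.Dict.counter (gs ++ [g]) := by
      rw [hfreq, PySem.Dict.counter_eq_foldl, PySem.Dict.counter_eq_foldl, List.foldl_append]
      rfl
    have hc : ((st.2.2.modify g 0 (· + 1)).getD g 0) = ((gs ++ [g]).count g : Int) := by
      rw [hfreq']; exact PySem.Dict.getD_counter _ _
    have hcount : ∀ h : String, (gs ++ [g]).count h = gs.count h + (if h = g then 1 else 0) := by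
      intro h
      rw [List.count_append]
      by_cases he : h = g
      · subst he; simp
      · have h0 : List.count h [g] = 0 := List.count_eq_zero.mpr (by simp [he])
        rw [h0, if_neg he]
    have hcg : ((gs ++ [g]).count g : Int) = (gs.count g : Int) + 1 := by
      rw [hcount]; simp
    show pvInv (gs ++ [g]) (pvGStep st g)
    simp only [pvGStep, hc]
    by_cases hgt : ((gs ++ [g]).count g : Int) > st.2.1
    · -- new maximum: fav = {g}, favFreq = new count
      have hadd : PySem.Set.add PySem.Set.empty g = [g] := rfl
      simp only [hgt, if_pos, BEq.rfl, hadd]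
      refine ⟨hfreq', ?_, ?_, ?_, ?_, ?_⟩
      · intro h hh
        rcases List.mem_append.mp hh with hh | hh
        · by_cases he : h = g
          · subst he; rfl
          · have := hle h hh
            rw [hcount]; simp [he]; omega
        · simp at hh; subst hh; rfl
      · intro habs; simp at habs
      · intro _; exact ⟨g, by simp, rfl⟩
      · simp
      · intro h
        simp only []
        constructor
        · intro hh; simp at hh; subst hh; exact ⟨by simp, rfl⟩
        · rintro ⟨hh, heq⟩
          by_cases he : h = g
          · simp [he]
          · exfalso
            rcases List.mem_append.mp hh with hh | hh
            · have := hle h hh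
              rw [hcount, if_neg he] at heq
              push_cast at heq
              omega
            · simp at hh; exact he hh
    · -- not a new maximum
      have hle' : ((gs ++ [g]).count g : Int) ≤ st.2.1 := by omega
      simp only [hgt, if_false]
      have hgne : gs ≠ [] := by
        intro he; subst he
        have := (hnil rfl).2
        simp at hgt
        omega
      refine ⟨hfreq', ?_, ?_, ?_, ?_, ?_⟩
      · intro h hh
        by_cases he : h = g
        · subst he; exact hle'
        · rw [hcount, if_neg he]
          rcases List.mem_append.mp hh with hh | hh
          · have := hle h hh; push_cast; omega
          · simp at hh; exact absurd hh he
      · intro habs; simp at habs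
      · intro _
        obtain ⟨h, hh, heq⟩ := hatt hgne
        by_cases he : h = g
        · exfalso; subst he
          rw [hcg] at hle'
          omega
        · exact ⟨h, by simp [List.mem_append.mpr (Or.inl hh)], by rw [hcount, if_neg he]; push_cast; omega⟩
      · split
        · exact PySem.Set.nodup_add _ _ hnd
        · exact hnd
      · intro h
        by_cases heq : ((gs ++ [g]).count g : Int) == st.2.1
        · rw [if_pos heq]
          rw [PySem.Set.mem_add]
          have heq' : ((gs ++ [g]).count g : Int) = st.2.1 := by
            exact of_decide_eq_true heq
          constructor
          · rintro (hh | hh)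
            · obtain ⟨hh1, hh2⟩ := (hmem h).mp hh
              have he : h ≠ g := by
                intro he; subst he
                rw [hcg] at heq'
                omega
              exact ⟨by simp [List.mem_append.mpr (Or.inl hh1)], by rw [hcount, if_neg he]; push_cast; omega⟩
            · subst hh; exact ⟨by simp, heq'⟩
          · rintro ⟨hh, hcnt⟩
            by_cases he : h = g
            · right; exact he
            · left
              apply (hmem h).mpr
              rcases List.mem_append.mp hh with hh | hh
              · rw [hcount, if_neg he] at hcnt
                push_cast at hcnt
                exact ⟨hh, by omega⟩
              · simp at hh; exact absurd hh he
        · rw [if_neg (by simpa using heq)]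
          have heq' : ((gs ++ [g]).count g : Int) ≠ st.2.1 := by
            simpa using heq
          constructor
          · intro hh
            obtain ⟨hh1, hh2⟩ := (hmem h).mp hh
            have he : h ≠ g := by
              intro he; subst he
              rw [hcg] at heq' hle'
              omega
            exact ⟨by simp [List.mem_append.mpr (Or.inl hh1)], by rw [hcount, if_neg he]; push_cast; omega⟩
          · rintro ⟨hh, hcnt⟩
            apply (hmem h).mpr
            by_cases he : h = g
            · exfalso; subst he; exact heq' hcnt
            · rcases List.mem_append.mp hh with hh | hh
              · rw [hcount, if_neg he] at hcnt
                push_cast at hcnt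
                exact ⟨hh, by omega⟩
              · simp at hh; exact absurd hh he

theorem pvAfold_eq (s2g : PySem.Dict String String) (songs : List String)
    (st : PySem.Set String × Int × PySem.Dict String Int) :
    songs.foldl (pvAStep s2g) st = (songs.filterMap s2g.get?).foldl pvGStep st := by
  induction songs generalizing st with
  | nil => rfl
  | cons s rest ih =>
    cases h : s2g.get? s with
    | none => simp [pvAStep, h, ih]
    | some g =>
      simp only [List.foldl_cons, List.filterMap_cons, h]
      rw [ih]
      have hstep : pvAStep s2g st s = pvGStep st g := by
        simp [pvAStep, pvGStep, h]
      rw [hstep]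

-- a member that bounds a (·≤·)-pairwise list from above is its last element
theorem pvLast_of_max (p : List String) (hs : p.Pairwise (· ≤ ·)) (g : String)
    (hg : g ∈ p) (hmax : ∀ x ∈ p, x ≤ g) : p.getLast? = some g := by
  induction p with
  | nil => cases hg
  | cons a t ih =>
    cases t with
    | nil =>
      simp at hg; subst hg; rfl
    | cons b u =>
      rw [List.getLast?_cons_cons]
      have hst := (List.pairwise_cons.mp hs).2
      have hab := (List.pairwise_cons.mp hs).1
      have hg' : g ∈ b :: u := by
        rcases List.mem_cons.mp hg with hg | hg
        · -- g = a: then b = g too, and b heads the tail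
          have hb : b = g := le_antisymm (hmax b (by simp)) (hg ▸ hab b (by simp))
          exact hb ▸ List.mem_cons_self
        · exact hg
      exact ih hst hg' (fun x hx => hmax x (List.mem_cons_of_mem a hx))

def pvScanInv (p : List String) (st : List String × Int × Int × Option String) : Prop :=
  st.2.2.2 = p.getLast? ∧
  (∀ g, p.getLast? = some g → st.2.2.1 = (p.count g : Int)) ∧
  (∀ g ∈ p, (p.count g : Int) ≤ st.2.1) ∧
  (p = [] → st.1 = [] ∧ st.2.1 = 0) ∧
  (p ≠ [] → ∃ g ∈ p, (p.count g : Int) = st.2.1) ∧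
  st.1.Pairwise (· < ·) ∧
  (∀ g, g ∈ st.1 ↔ g ∈ p ∧ (p.count g : Int) = st.2.1)

theorem pvScan_inv (p : List String) (hs : p.Pairwise (· ≤ ·)) :
    pvScanInv p (p.foldl pvScanStep ([], 0, 0, none)) := by
  induction p using List.reverseRecOn with
  | nil => exact ⟨rfl, by simp, by simp, by simp, by simp, by simp, by simp⟩
  | append_singleton p g ih =>
    have hsp : p.Pairwise (· ≤ ·) := (List.pairwise_append.mp hs).1
    have hbound : ∀ x ∈ p, x ≤ g := fun x hx =>
      (List.pairwise_append.mp hs).2.2 x hx g (by simp)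
    obtain ⟨hprev, hrun, hle, hnil, hatt, hpw, hmem⟩ := ih hsp
    rw [List.foldl_append]
    set st := p.foldl pvScanStep ([], 0, 0, none) with hst
    have hlast : (p ++ [g]).getLast? = some g := by simp
    have hcount : ∀ h : String, (p ++ [g]).count h = p.count h + (if h = g then 1 else 0) := by
      intro h
      rw [List.count_append]
      by_cases he : h = g
      · subst he; simp
      · have h0 : List.count h [g] = 0 := List.count_eq_zero.mpr (by simp [he])
        rw [h0, if_neg he]
    have hcg : ((p ++ [g]).count g : Int) = (p.count g : Int) + 1 := by rw [hcount]; simp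
    -- the run counter after this step is the count of g in p ++ [g]
    have hrun' : (if some g == st.2.2.2 then st.2.2.1 + 1 else 1) = ((p ++ [g]).count g : Int) := by
      by_cases hpe : p = []
      · subst hpe
        have : st.2.2.2 = none := hprev
        simp [this]
      · obtain ⟨L, hL⟩ : ∃ L, p.getLast? = some L := by
          cases h : p.getLast? with
          | none => exact absurd (List.getLast?_eq_none_iff.mp h) hpe
          | some L => exact ⟨L, rfl⟩
        by_cases he : g = L
        · subst he
          have : some g == st.2.2.2 := by rw [hprev, hL]; simp
          rw [if_pos this, hrun g hL, hcg]
        · have hgnp : g ∉ p := by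
            intro hg
            exact he (Option.some.inj ((pvLast_of_max p hsp g hg hbound).symm.trans hL))
          have : ¬ (some g == st.2.2.2) := by
            rw [hprev, hL]; simpa using he
          rw [if_neg this, hcg]
          have : p.count g = 0 := List.count_eq_zero.mpr hgnp
          rw [this]; simp
    show pvScanInv (p ++ [g]) (pvScanStep st g)
    simp only [pvScanStep, hrun']
    by_cases hgt : ((p ++ [g]).count g : Int) > st.2.1
    · rw [if_pos hgt]
      refine ⟨by simp, ?_, ?_, by simp, fun _ => ⟨g, by simp, rfl⟩, by simp, ?_⟩
      · intro h hh
        rw [hlast] at hh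
        cases hh; rfl
      · intro h hh
        rcases List.mem_append.mp hh with hh | hh
        · by_cases he : h = g
          · subst he; rfl
          · have := hle h hh
            rw [hcount]; simp [he]; omega
        · simp at hh; subst hh; rfl
      · intro h
        simp only [List.mem_singleton]
        constructor
        · intro hh; subst hh; exact ⟨by simp, rfl⟩
        · rintro ⟨hh, heq⟩
          by_cases he : h = g
          · exact he
          · exfalso
            rcases List.mem_append.mp hh with hh | hh
            · have := hle h hh
              rw [hcount, if_neg he] at heq
              push_cast at heq
              omega
            · simp at hh; exact he hh
    · rw [if_neg hgt]
      have hle' : ((p ++ [g]).count g : Int) ≤ st.2.1 := by omega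
      have hpne : p ≠ [] := by
        intro he; subst he
        have h2 := (hnil rfl).2
        have h1 : ((([] : List String) ++ [g]).count g : Int) = 1 := by simp
        omega
      have hgnbest : g ∉ st.1 := by
        intro hg
        have := ((hmem g).mp hg).2
        omega
      have hbound' : ∀ x ∈ st.1, x < g := by
        intro x hx
        have hxp := ((hmem x).mp hx).1
        have hxle := hbound x hxp
        rcases lt_or_eq_of_le hxle with h | h
        · exact h
        · exact absurd (h ▸ hx) hgnbest
      by_cases heq : ((p ++ [g]).count g : Int) == st.2.1
      · rw [if_pos heq]
        have heq' : ((p ++ [g]).count g : Int) = st.2.1 := of_decide_eq_true heq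
        refine ⟨by simp, ?_, ?_, by simp, ?_, ?_, ?_⟩
        · intro h hh
          rw [hlast] at hh
          cases hh; exact heq'.symm ▸ rfl
        · intro h hh
          by_cases he : h = g
          · subst he; exact hle'
          · rw [hcount, if_neg he]
            rcases List.mem_append.mp hh with hh | hh
            · have := hle h hh; push_cast; omega
            · simp at hh; exact absurd hh he
        · intro _; exact ⟨g, by simp, heq'⟩
        · exact List.pairwise_append.mpr ⟨hpw, by simp, fun a ha b hb => by simp at hb; subst hb; exact hbound' a ha⟩
        · intro h
          rw [List.mem_append, List.mem_singleton]
          constructor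
          · rintro (hh | hh)
            · obtain ⟨hh1, hh2⟩ := (hmem h).mp hh
              have he : h ≠ g := fun he => hgnbest (he ▸ hh)
              exact ⟨by simp [List.mem_append.mpr (Or.inl hh1)], by rw [hcount, if_neg he]; push_cast; omega⟩
            · subst hh; exact ⟨by simp, heq'⟩
          · rintro ⟨hh, hcnt⟩
            by_cases he : h = g
            · right; exact he
            · left
              apply (hmem h).mpr
              rcases List.mem_append.mp hh with hh | hh
              · rw [hcount, if_neg he] at hcnt
                push_cast at hcnt
                exact ⟨hh, by omega⟩
              · simp at hh; exact absurd hh he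
      · rw [if_neg (by simpa using heq)]
        have heq' : ((p ++ [g]).count g : Int) ≠ st.2.1 := by simpa using heq
        refine ⟨by simp, ?_, ?_, by simp, ?_, hpw, ?_⟩
        · intro h hh
          rw [hlast] at hh
          cases hh; rfl
        · intro h hh
          by_cases he : h = g
          · subst he; exact hle'
          · rw [hcount, if_neg he]
            rcases List.mem_append.mp hh with hh | hh
            · have := hle h hh; push_cast; omega
            · simp at hh; exact absurd hh he
        · intro _
          obtain ⟨h, hh, hch⟩ := hatt hpne
          have he : h ≠ g := by
            intro he; subst he
            omega
          exact ⟨h, List.mem_append.mpr (Or.inl hh), by rw [hcount, if_neg he]; push_cast; omega⟩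
        · intro h
          constructor
          · intro hh
            obtain ⟨hh1, hh2⟩ := (hmem h).mp hh
            have he : h ≠ g := fun he => hgnbest (he ▸ hh)
            exact ⟨List.mem_append.mpr (Or.inl hh1), by rw [hcount, if_neg he]; push_cast; omega⟩
          · rintro ⟨hh, hcnt⟩
            apply (hmem h).mpr
            by_cases he : h = g
            · exfalso; subst he; exact heq' hcnt
            · rcases List.mem_append.mp hh with hh | hh
              · rw [hcount, if_neg he] at hcnt
                push_cast at hcnt
                exact ⟨hh, by omega⟩
              · simp at hh; exact absurd hh he

theorem pvUser_eq (s2g : PySem.Dict String String) (songs : List String) :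
    PySem.List.sorted (songs.foldl (pvAStep s2g) (PySem.Set.empty, 0, PySem.Dict.empty)).1 (fun x => x) false
      = ((PySem.List.sorted (songs.filterMap s2g.get?) (fun x => x) false).foldl pvScanStep ([], 0, 0, none)).1 := by
  rw [pvAfold_eq]
  set gs := songs.filterMap s2g.get? with hgs
  set gsS := PySem.List.sorted gs (fun x => x) false with hgsS
  obtain ⟨_, hleA, hnilA, hattA, hndA, hmemA⟩ := pvA_inv gs
  have hperm : gsS.Perm gs := PySem.List.sorted_perm gs (fun x => x) false
  have hcnt : ∀ h : String, gsS.count h = gs.count h := fun h => hperm.count_eq h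
  obtain ⟨_, _, hleB, hnilB, hattB, hpwB, hmemB⟩ :=
    pvScan_inv gsS (PySem.List.sorted_pairwise gs (fun x => x))
  set stA := gs.foldl pvGStep (PySem.Set.empty, 0, PySem.Dict.empty)
  set stB := gsS.foldl pvScanStep ([], 0, 0, none)
  by_cases hge : gs = []
  · have hgse : gsS = [] := by rw [hgsS, hge]; rfl
    have h1 := hnilA hge
    have h2 := hnilB hgse
    rw [h1.1, h2.1]
    rfl
  · have hgse : gsS ≠ [] := by
      intro h
      rw [hgsS, PySem.List.sorted_eq_nil_iff] at h
      exact hge h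
    -- the two maxima agree
    have hmax : stA.2.1 = stB.2.1 := by
      obtain ⟨a, ha, hca⟩ := hattA hge
      obtain ⟨b, hb, hcb⟩ := hattB hgse
      have hb' : b ∈ gs := hperm.mem_iff.mp hb
      have h1 : (gs.count a : Int) ≤ stB.2.1 := by
        have := hleB a (hperm.mem_iff.mpr ha)
        rwa [hcnt a] at this
      have h2 : (gs.count b : Int) ≤ stA.2.1 := hleA b hb'
      rw [hcnt b] at hcb
      omega
    -- same membership, both duplicate-free, B's list strictly increasing
    have hmemEq : ∀ h, h ∈ stA.1 ↔ h ∈ stB.1 := by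
      intro h
      rw [hmemA h, hmemB h, hperm.mem_iff, hcnt h, hmax]
    have hpermAB : stB.1.Perm stA.1 := by
      rw [List.perm_ext_iff_of_nodup (hpwB.imp ne_of_lt) hndA]
      intro h
      exact (hmemEq h).symm
    exact PySem.List.sorted_eq_of_perm_of_pairwise_lt stA.1 stB.1 (fun x => x) hpermAB hpwB

theorem pvOuter_eq (songGenres : List (String × List String)) (l : List (String × List String))
    (d : PySem.Dict String (List String)) :
    l.foldl (fun res p =>
        res.insert p.1 (PySem.List.sorted (p.2.foldl (pvAStep (pvSong2Genre songGenres)) (PySem.Set.empty, 0, PySem.Dict.empty)).1 (fun x => x) false)) d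
      = l.foldl (fun res p =>
        res.insert p.1 (((PySem.List.sorted (p.2.filterMap (pvSong2Genre songGenres).get?) (fun x => x) false).foldl pvScanStep ([], 0, 0, none)).1)) d := by
  induction l generalizing d with
  | nil => rfl
  | cons p rest ih =>
    simp only [List.foldl_cons]
    rw [pvUser_eq, ih]

-- ===== VERDICT (by name: the statement is the Claim_ definition above) =====
theorem favorite_genres_spec : Claim_equal_favorite_genres := by
  intro userSongs songGenres _
  unfold Spec_favorite_genres favorite_genres favorite_genres_alt
  exact congrArg PySem.Dict.items (pvOuter_eq songGenres userSongs PySem.Dict.empty)
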